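-- pv_equiv track=rewrite | github.com/antonic901/plugin.video.youtube | resources/lib/router.py | find_stream
-- ===== SOURCE A (Python) =====
-- def find_stream(streams, resolution):
--     for stream in streams:
--         if stream["resolution"] == resolution:
--             return stream["url"]
--
--     if resolution == "720p":
--         return find_stream(streams, "480p")
--     if resolution == "480p":
--         return find_stream(streams, "360p")
--     if resolution == "360p":
--         return find_stream(streams, "240p")
--     if resolution == "240p":
--         return find_stream(streams, "144p")
--
--     return None
-- ===== SOURCE B (Python) =====
-- _FALLBACK_ORDER = ["720p", "480p", "360p", "240p", "144p"]
--
--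
-- def find_stream(streams, resolution):
--     # One pass: map each resolution to its FIRST stream.
--     mapping = {}
--     for stream in streams:
--         res = stream["resolution"]
--         if res not in mapping:
--             mapping[res] = stream
--     try:
--         start = _FALLBACK_ORDER.index(resolution)
--         candidates = _FALLBACK_ORDER[start:]
--     except ValueError:
--         candidates = [resolution]
--     for res in candidates:
--         if res in mapping:
--             return mapping[res]["url"]
--     return None
-- ===== Notes on version B (the rewrite author's own statement) =====
-- stated objective: idiomatic
-- what changed: Replaces the recursive fallback chain of repeated full scans with a single pass building a first-occurrence resolution-to-stream index plus one walk down an explicit fallback-order list.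
import Mathlib
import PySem

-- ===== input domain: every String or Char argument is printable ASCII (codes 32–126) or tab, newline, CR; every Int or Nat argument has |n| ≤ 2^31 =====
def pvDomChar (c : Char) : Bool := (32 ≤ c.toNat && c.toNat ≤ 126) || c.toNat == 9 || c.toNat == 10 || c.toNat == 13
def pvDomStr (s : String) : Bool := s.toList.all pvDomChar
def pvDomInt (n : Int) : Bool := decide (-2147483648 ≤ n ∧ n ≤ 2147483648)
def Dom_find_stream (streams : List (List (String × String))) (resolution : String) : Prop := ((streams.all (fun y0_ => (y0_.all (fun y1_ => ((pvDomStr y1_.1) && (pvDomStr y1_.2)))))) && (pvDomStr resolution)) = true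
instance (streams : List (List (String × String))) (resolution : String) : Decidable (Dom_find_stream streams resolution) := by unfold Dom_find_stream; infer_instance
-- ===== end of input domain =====

-- B replaces A's recursive fallback chain of repeated full scans by one first-occurrence
-- resolution→stream index and a single walk down an explicit fallback-order list (idiomatic).
-- Equivalence of the RETURN value is proved on Pre_ (the inputs where the Python A raises no KeyError).

-- dict lookup d[k] for a stream dict given as an association list (first match)
def lookupS (d : List (String × String)) (k : String) : Option String :=
  (d.find? (fun p => p.1 == k)).map (·.2)

-- ===== PORT A =====
-- the 'for stream in streams' scan: first stream whose "resolution" equals r.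
-- A stream lacking the "resolution" key makes Python raise KeyError (excluded by Pre_);
-- the port just does not match it.
def scanA (streams : List (List (String × String))) (r : String) : Option (List (String × String)) :=
  streams.find? (fun s => lookupS s "resolution" == some r)

def pvRank (r : String) : Nat :=
  if r = "720p" then 4 else if r = "480p" then 3 else if r = "360p" then 2
  else if r = "240p" then 1 else 0

def find_stream (streams : List (List (String × String))) (resolution : String) : Option String :=
  match scanA streams resolution with
  | some s => lookupS s "url"   -- KeyError if "url" missing: excluded by Pre_
  | none =>
    if resolution = "720p" then find_stream streams "480p"
    else if resolution = "480p" then find_stream streams "360p"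
    else if resolution = "360p" then find_stream streams "240p"
    else if resolution = "240p" then find_stream streams "144p"
    else none
termination_by pvRank resolution
decreasing_by all_goals simp_all [pvRank]

-- ===== PORT B =====
def fallbackOrder : List String := ["720p", "480p", "360p", "240p", "144p"]

-- the index-building pass: keep the FIRST stream per resolution.
-- A stream lacking "resolution" raises KeyError in Python (excluded by Pre_); the port skips it.
def buildB (streams : List (List (String × String)))
    (m : PySem.Dict String (List (String × String))) : PySem.Dict String (List (String × String)) :=
  match streams with
  | [] => m
  | s :: rest =>
    match lookupS s "resolution" with
    | some r => buildB rest (if (m.get? r).isSome then m else m.insert r s)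
    | none => buildB rest m

-- the walk down the candidate list
def walkB (cands : List String) (m : PySem.Dict String (List (String × String))) : Option String :=
  match cands with
  | [] => none
  | r :: rest =>
    match m.get? r with
    | some s => lookupS s "url"
    | none => walkB rest m

def find_stream_alt (streams : List (List (String × String))) (resolution : String) : Option String :=
  let mapping := buildB streams PySem.Dict.empty
  let cands :=
    match PySem.List.index? fallbackOrder resolution with
    | some i => PySem.List.slice fallbackOrder (some (i : Int)) none
    | none => [resolution]
  walkB cands mapping

-- ===== PRECONDITION & SPEC =====
-- Pre_ admits exactly the inputs on which the Python A returns: every stream has a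
-- "resolution" key, and the stream A selects (first stream matching the first resolution of the
-- fallback chain that matches at all) has a "url" key; elsewhere A raises KeyError.
def pvChainOf (r : String) : List String :=
  if r = "720p" then ["720p", "480p", "360p", "240p", "144p"]
  else if r = "480p" then ["480p", "360p", "240p", "144p"]
  else if r = "360p" then ["360p", "240p", "144p"]
  else if r = "240p" then ["240p", "144p"]
  else [r]

def pvSelect (streams : List (List (String × String))) (r : String) : Option (List (String × String)) :=
  (pvChainOf r).findSome? (fun q => streams.find? (fun s => lookupS s "resolution" == some q))

def Pre_find_stream (streams : List (List (String × String))) (resolution : String) : Prop :=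
  streams.all (fun s => (lookupS s "resolution").isSome) = true ∧
  (pvSelect streams resolution).all (fun s => (lookupS s "url").isSome) = true
instance (streams : List (List (String × String))) (resolution : String) : Decidable (Pre_find_stream streams resolution) := by unfold Pre_find_stream; infer_instance

def pvWitness_find_stream : (List (List (String × String))) × String :=
  ([[("resolution", "480p"), ("url", "u480")], [("resolution", "720p"), ("url", "u720")]], "720p")

def Spec_find_stream (streams : List (List (String × String))) (resolution : String) (out : Option String) : Prop := out = find_stream_alt streams resolution
instance (streams : List (List (String × String))) (resolution : String) (out : Option String) : Decidable (Spec_find_stream streams resolution out) := by unfold Spec_find_stream; infer_instance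

-- ===== CLAIM (what is proved, stated in full; the proofs are below) =====
def Claim_equal_find_stream : Prop := ∀ (streams : List (List (String × String))) (resolution : String), Dom_find_stream streams resolution → Pre_find_stream streams resolution → Spec_find_stream streams resolution (find_stream streams resolution)

-- ===== LEMMAS AND PROOFS =====

theorem walk_cons (r : String) (rest : List String) (m : PySem.Dict String (List (String × String))) :
    walkB (r :: rest) m = (match m.get? r with | some s => lookupS s "url" | none => walkB rest m) := rfl

-- the built index looks up to exactly A's first-match scan
theorem buildB_get (streams : List (List (String × String)))
    (m : PySem.Dict String (List (String × String))) (r : String) :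
    (buildB streams m).get? r =
      (match m.get? r with | some v => some v | none => scanA streams r) := by
  induction streams generalizing m with
  | nil => cases hm : m.get? r <;> simp [buildB, scanA, hm]
  | cons s rest ih =>
    simp only [buildB]
    cases hres : lookupS s "resolution" with
    | none =>
      rw [ih]
      have htail : scanA (s :: rest) r = scanA rest r := by
        simp [scanA, hres]
      rw [htail]
    | some q =>
      by_cases hqr : q = r
      · subst hqr
        have hhead : scanA (s :: rest) q = some s := by
          simp [scanA, hres]
        cases hm : m.get? q with
        | some v => rw [ih, if_pos (by simp [hm])]; simp [hm]
        | none =>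
          rw [ih, if_neg (by simp [hm]), PySem.Dict.get?_insert_self]
          simp [hhead]
      · have htail : scanA (s :: rest) r = scanA rest r := by
          simp [scanA, hres, hqr]
        cases hm : m.get? q with
        | some v => rw [ih, if_pos (by simp [hm]), htail]
        | none =>
          rw [ih, if_neg (by simp [hm]),
            PySem.Dict.get?_insert_of_ne m s (fun h => hqr h.symm), htail]

theorem mget (streams : List (List (String × String))) (r : String) :
    (buildB streams PySem.Dict.empty).get? r = scanA streams r := by
  rw [buildB_get, PySem.Dict.get?_empty]

theorem step_generic (streams : List (List (String × String))) (r : String)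
    (h1 : r ≠ "720p") (h2 : r ≠ "480p") (h3 : r ≠ "360p") (h4 : r ≠ "240p") :
    find_stream streams r = walkB [r] (buildB streams PySem.Dict.empty) := by
  rw [walk_cons, mget]
  unfold find_stream
  cases hs : scanA streams r
  · rw [if_neg h1, if_neg h2, if_neg h3, if_neg h4]; rfl
  · rfl

theorem step240 (streams : List (List (String × String))) :
    find_stream streams "240p" = walkB ["240p", "144p"] (buildB streams PySem.Dict.empty) := by
  rw [walk_cons, mget]
  unfold find_stream
  cases hs : scanA streams "240p"
  · rw [if_neg (by decide), if_neg (by decide), if_neg (by decide), if_pos rfl]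
    exact step_generic streams "144p" (by decide) (by decide) (by decide) (by decide)
  · rfl

theorem step360 (streams : List (List (String × String))) :
    find_stream streams "360p" = walkB ["360p", "240p", "144p"] (buildB streams PySem.Dict.empty) := by
  rw [walk_cons, mget]
  unfold find_stream
  cases hs : scanA streams "360p"
  · rw [if_neg (by decide), if_neg (by decide), if_pos rfl]
    exact step240 streams
  · rfl

theorem step480 (streams : List (List (String × String))) :
    find_stream streams "480p" = walkB ["480p", "360p", "240p", "144p"] (buildB streams PySem.Dict.empty) := by
  rw [walk_cons, mget]
  unfold find_stream
  cases hs : scanA streams "480p"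
  · rw [if_neg (by decide), if_pos rfl]
    exact step360 streams
  · rfl

theorem step720 (streams : List (List (String × String))) :
    find_stream streams "720p" = walkB ["720p", "480p", "360p", "240p", "144p"] (buildB streams PySem.Dict.empty) := by
  rw [walk_cons, mget]
  unfold find_stream
  cases hs : scanA streams "720p"
  · rw [if_pos rfl]
    exact step480 streams
  · rfl

theorem main_eq (streams : List (List (String × String))) (resolution : String) :
    find_stream streams resolution = find_stream_alt streams resolution := by
  by_cases e1 : resolution = "720p"
  · subst e1; rw [step720]; rfl
  by_cases e2 : resolution = "480p"
  · subst e2; rw [step480]; rfl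
  by_cases e3 : resolution = "360p"
  · subst e3; rw [step360]; rfl
  by_cases e4 : resolution = "240p"
  · subst e4; rw [step240]; rfl
  by_cases e5 : resolution = "144p"
  · subst e5
    rw [step_generic streams "144p" (by decide) (by decide) (by decide) (by decide)]
    rfl
  · have hidx : PySem.List.index? fallbackOrder resolution = none := by
      rw [PySem.List.index?_eq_none_iff]
      simp [fallbackOrder, e1, e2, e3, e4, e5]
    simp only [find_stream_alt, hidx]
    exact step_generic streams resolution e1 e2 e3 e4

-- ===== VERDICT (by name: the statement is the Claim_ definition above) =====
theorem find_stream_spec : Claim_equal_find_stream := by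
  intro streams resolution _ _
  unfold Spec_find_stream
  exact main_eq streams resolution
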